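-- pv_equiv track=rewrite | github.com/kshoker12/UFC-Fight-Predictor | fight_app_data.py | catalog_display_names
-- ===== SOURCE A (Python) =====
-- from typing import Any, Dict, List, Optional, Tuple
--
-- def catalog_display_names(catalog: Dict[str, Dict[str, Any]]) -> List[str]:
--     names = []
--     seen = set()
--     for fd in catalog.values():
--         n = str(fd.get("name", "") or "").strip()
--         if not n:
--             continue
--         low = n.lower()
--         if low in seen:
--             continue
--         seen.add(low)
--         names.append(n)
--     return sorted(names, key=lambda x: x.lower())
-- ===== SOURCE B (Python) =====
-- from typing import Any, Dict, List
--
-- def catalog_display_names(catalog: Dict[str, Dict[str, Any]]) -> List[str]: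
--     # Maintain `result` sorted by lowercase with unique lowercase keys: for each
--     # normalized name, scan to its position; skip it if its lowercase is already
--     # there, otherwise insert it in place. No final sort, no auxiliary set.
--     result: List[str] = []
--     for fd in catalog.values():
--         n = str(fd.get("name", "") or "").strip()
--         if not n:
--             continue
--         low = n.lower()
--         i = 0
--         while i < len(result) and result[i].lower() < low:
--             i += 1
--         if i < len(result) and result[i].lower() == low:
--             continue
--         result.insert(i, n)
--     return result
-- ===== Notes on version B (the rewrite author's own statement) =====
-- stated objective: alternative
-- what changed: Replaces A's seen-set + append + final key-sort with a single pass that keeps the result list sorted by lowercase with unique lowercase keys, inserting each normalized name in place (or skipping it when its lowercase is already present); no set and no sort call.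
import Mathlib
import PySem

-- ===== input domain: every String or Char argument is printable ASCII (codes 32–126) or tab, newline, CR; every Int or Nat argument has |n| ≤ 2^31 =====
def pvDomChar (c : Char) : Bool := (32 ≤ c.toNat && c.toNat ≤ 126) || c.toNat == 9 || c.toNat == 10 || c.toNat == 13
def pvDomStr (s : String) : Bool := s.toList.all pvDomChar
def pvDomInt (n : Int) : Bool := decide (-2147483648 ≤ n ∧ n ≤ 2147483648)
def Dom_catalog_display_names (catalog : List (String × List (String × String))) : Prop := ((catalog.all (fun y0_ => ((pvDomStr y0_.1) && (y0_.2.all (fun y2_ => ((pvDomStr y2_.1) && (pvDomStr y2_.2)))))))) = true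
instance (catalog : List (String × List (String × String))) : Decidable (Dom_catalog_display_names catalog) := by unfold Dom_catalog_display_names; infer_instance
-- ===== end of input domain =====

-- B keeps the result sorted by lowercase with unique lowercase keys via in-place insertion,
-- instead of A's seen-set + append + final key-sort; same return value, no speed claim.

-- ===== PORT A =====
-- str(fd.get("name","") or "").strip(): on str values 'str(x or "")' is the identity, so this is strip(getD fd "name" "")
def catalog_display_names (catalog : List (String × List (String × String))) : List String :=
  let st := (PySem.Dict.ofList catalog).values.foldl
    (fun (st : List String × PySem.Set String) fd =>
      let n := PySem.Str.strip ((PySem.Dict.ofList fd).getD "name" "")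
      if n = "" then st
      else
        let low := PySem.Str.lower n
        if PySem.Set.contains st.2 low then st
        else (st.1 ++ [n], PySem.Set.add st.2 low))
    ([], PySem.Set.empty)
  PySem.List.sorted st.1 (fun x => PySem.Str.lower x) false

-- ===== PORT B =====
-- the while/insert scan of Source B as a structural recursion over the (sorted) result list
def pvInsLow (n low : String) : List String → List String
  | [] => [n]
  | x :: xs =>
    if PySem.Str.lower x < low then x :: pvInsLow n low xs
    else if PySem.Str.lower x = low then x :: xs
    else n :: x :: xs

def catalog_display_names_alt (catalog : List (String × List (String × String))) : List String :=
  (PySem.Dict.ofList catalog).values.foldl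
    (fun acc fd =>
      let n := PySem.Str.strip ((PySem.Dict.ofList fd).getD "name" "")
      if n = "" then acc else pvInsLow n (PySem.Str.lower n) acc)
    []

-- ===== PRECONDITION & SPEC =====
def Spec_catalog_display_names (catalog : List (String × List (String × String))) (out : List String) : Prop := out = catalog_display_names_alt catalog
instance (catalog : List (String × List (String × String))) (out : List String) : Decidable (Spec_catalog_display_names catalog out) := by unfold Spec_catalog_display_names; infer_instance

-- ===== CLAIM (what is proved, stated in full; the proofs are below) =====
def Claim_equal_catalog_display_names : Prop := ∀ (catalog : List (String × List (String × String))), Dom_catalog_display_names catalog → Spec_catalog_display_names catalog (catalog_display_names catalog)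

-- ===== LEMMAS AND PROOFS =====

-- if low is already among the lowercases of a strictly-increasing list, pvInsLow changes nothing
theorem pvInsLow_of_mem (n low : String) (acc : List String)
    (hp : acc.Pairwise (fun a b => PySem.Str.lower a < PySem.Str.lower b))
    (hm : low ∈ acc.map PySem.Str.lower) : pvInsLow n low acc = acc := by
  induction acc with
  | nil => simp at hm
  | cons x xs ih =>
    rcases List.pairwise_cons.mp hp with ⟨hx, hxs⟩
    simp only [List.map_cons, List.mem_cons] at hm
    by_cases h1 : PySem.Str.lower x < low
    · have hm' : low ∈ xs.map PySem.Str.lower := by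
        rcases hm with h | h
        · exact absurd h (ne_of_gt h1)
        · exact h
      simp [pvInsLow, h1, ih hxs hm']
    · by_cases h2 : PySem.Str.lower x = low
      · simp [pvInsLow, h2]
      · exfalso
        rcases hm with h | h
        · exact h2 h.symm
        · rcases List.mem_map.mp h with ⟨y, hy, hly⟩
          exact h1 (hly ▸ hx y hy)

-- if low is new, pvInsLow inserts n: the result is a permutation of acc ++ [n]
theorem pvInsLow_perm (n low : String) (acc : List String)
    (hm : low ∉ acc.map PySem.Str.lower) :
    (pvInsLow n low acc).Perm (acc ++ [n]) := by
  induction acc with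
  | nil => simp [pvInsLow]
  | cons x xs ih =>
    simp only [List.map_cons, List.mem_cons, not_or] at hm
    by_cases h1 : PySem.Str.lower x < low
    · simpa [pvInsLow, h1] using (ih hm.2).cons x
    · by_cases h2 : PySem.Str.lower x = low
      · exact absurd h2.symm hm.1
      · simpa [pvInsLow, h1, h2] using (List.perm_append_singleton n (x :: xs)).symm

-- inserting a new lowercase keeps the list strictly increasing on lowercases
theorem pvInsLow_pairwise (n low : String) (acc : List String)
    (hp : acc.Pairwise (fun a b => PySem.Str.lower a < PySem.Str.lower b))
    (hl : PySem.Str.lower n = low)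
    (hm : low ∉ acc.map PySem.Str.lower) :
    (pvInsLow n low acc).Pairwise (fun a b => PySem.Str.lower a < PySem.Str.lower b) := by
  induction acc with
  | nil => simp [pvInsLow]
  | cons x xs ih =>
    rcases List.pairwise_cons.mp hp with ⟨hx, hxs⟩
    simp only [List.map_cons, List.mem_cons, not_or] at hm
    by_cases h1 : PySem.Str.lower x < low
    · have hperm := pvInsLow_perm n low xs hm.2
      simp only [pvInsLow, if_pos h1]
      refine List.pairwise_cons.mpr ⟨?_, ih hxs hm.2⟩
      intro y hy
      rcases List.mem_append.mp (hperm.mem_iff.mp hy) with h | h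
      · exact hx y h
      · simp only [List.mem_singleton] at h
        subst h; rw [hl]; exact h1
    · by_cases h2 : PySem.Str.lower x = low
      · exact absurd h2.symm hm.1
      · have hlt : low < PySem.Str.lower x := lt_of_le_of_ne (not_lt.mp h1) (Ne.symm h2)
        simp only [pvInsLow, if_neg h1, if_neg h2]
        refine List.pairwise_cons.mpr ⟨?_, hp⟩
        intro y hy
        rcases List.mem_cons.mp hy with h | h
        · subst h; rw [hl]; exact hlt
        · rw [hl]; exact lt_trans hlt (hx y h)

-- loop invariant: B's accumulator is a strictly-increasing (on lowercase) rearrangement of A's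
-- names list, and A's seen set is exactly the set of their lowercases
theorem pv_loop (vs : List (List (String × String))) (names acc : List String)
    (hseen : acc.Perm names)
    (hp : acc.Pairwise (fun a b => PySem.Str.lower a < PySem.Str.lower b)) :
    PySem.List.sorted
      (vs.foldl
        (fun (st : List String × PySem.Set String) fd =>
          let n := PySem.Str.strip ((PySem.Dict.ofList fd).getD "name" "")
          if n = "" then st
          else
            let low := PySem.Str.lower n
            if PySem.Set.contains st.2 low then st
            else (st.1 ++ [n], PySem.Set.add st.2 low))
        (names, PySem.Set.ofList (names.map PySem.Str.lower))).1
      (fun x => PySem.Str.lower x) false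
    = vs.foldl
        (fun acc fd =>
          let n := PySem.Str.strip ((PySem.Dict.ofList fd).getD "name" "")
          if n = "" then acc else pvInsLow n (PySem.Str.lower n) acc)
        acc := by
  induction vs generalizing names acc with
  | nil =>
    simpa using PySem.List.sorted_eq_of_perm_of_pairwise_lt names acc
      (fun x => PySem.Str.lower x) hseen hp
  | cons fd vs ih =>
    simp only [List.foldl_cons]
    set n := PySem.Str.strip ((PySem.Dict.ofList fd).getD "name" "") with hn
    by_cases hne : n = ""
    · simp only [hne, reduceIte]
      exact ih names acc hseen hp
    · simp only [if_neg hne]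
      by_cases hmem : PySem.Str.lower n ∈ names.map PySem.Str.lower
      · have hcontains : PySem.Set.contains (PySem.Set.ofList (names.map PySem.Str.lower)) (PySem.Str.lower n) = true := by
          simp only [PySem.Set.contains_iff, PySem.Set.mem_ofList]; exact hmem
        have hmacc : PySem.Str.lower n ∈ acc.map PySem.Str.lower :=
          ((hseen.map PySem.Str.lower).mem_iff).mpr hmem
        simp only [hcontains, if_true]
        rw [pvInsLow_of_mem n (PySem.Str.lower n) acc hp hmacc]
        exact ih names acc hseen hp
      · have hcontains : PySem.Set.contains (PySem.Set.ofList (names.map PySem.Str.lower)) (PySem.Str.lower n) = false := by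
          simp only [Bool.eq_false_iff, Ne, PySem.Set.contains_iff, PySem.Set.mem_ofList]
          exact hmem
        have hmacc : PySem.Str.lower n ∉ acc.map PySem.Str.lower := fun h =>
          hmem (((hseen.map PySem.Str.lower).mem_iff).mp h)
        have hset : PySem.Set.add (PySem.Set.ofList (names.map PySem.Str.lower)) (PySem.Str.lower n)
            = PySem.Set.ofList ((names ++ [n]).map PySem.Str.lower) := by
          simp [List.map_append, PySem.Set.ofList_append_singleton]
        simp only [hcontains, Bool.false_eq_true, if_false]
        rw [hset]
        exact ih (names ++ [n]) (pvInsLow n (PySem.Str.lower n) acc)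
          ((pvInsLow_perm n (PySem.Str.lower n) acc hmacc).trans (hseen.append_right [n]))
          (pvInsLow_pairwise n (PySem.Str.lower n) acc hp rfl hmacc)

-- ===== VERDICT (by name: the statement is the Claim_ definition above) =====
theorem catalog_display_names_spec : Claim_equal_catalog_display_names := by
  intro catalog _
  unfold Spec_catalog_display_names catalog_display_names catalog_display_names_alt
  simpa using pv_loop (PySem.Dict.ofList catalog).values [] [] (List.Perm.refl []) (by simp)
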